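-- pv_equiv track=rewrite | github.com/ChaeWonKong/algorithm-with-python | programmers_test/3.py | items_to_use
-- ===== SOURCE A (Python) =====
-- def items_to_use(healths, items):
--     ret = []
--     item_dict = []
--     h = i = 0
--
--     # preprocess item elements into dicts for sorting
--     for i in range(len(items)):
--         el = {'d': items[i][0], 'hp': items[i][1], 'n': i+1}
--         item_dict.append(el)
--
--     healths.sort()
--     item_dict.sort(key=lambda x: x['hp'])
--     item_dict.sort(key=lambda x: x['d'], reverse=True)
--
--     for h in range(len(healths)):
--         for i in range(len(item_dict)):
--             if healths[h] - item_dict[i]['hp'] >= 100: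
--                 ret.append(item_dict[i]['n'])
--                 item_dict.pop(i)
--                 break
--
--     ret.sort()
--     return ret
-- ===== SOURCE B (Python) =====
-- # Single ascending sweep: healths sorted, items sorted by hp threshold; a pointer
-- # feeds newly-eligible items into a list kept sorted by priority key (-d, hp, idx),
-- # whose head is popped for each health.  Sorts `healths` in place, like A.
-- def _insert_sorted(es, k):
--     j = 0
--     n = len(es)
--     while j < n and es[j] < k:
--         j += 1
--     es.insert(j, k)
--
--
-- def items_to_use(healths, items):
--     healths.sort()
--     pool = sorted([(-it[0], it[1], i + 1) for i, it in enumerate(items)],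
--                   key=lambda t: t[1])
--     elig = []
--     ret = []
--     p = 0
--     m = len(pool)
--     for h in healths:
--         while p < m and pool[p][1] <= h - 100:
--             _insert_sorted(elig, pool[p])
--             p += 1
--         if elig:
--             ret.append(elig.pop(0)[2])
--     ret.sort()
--     return ret
-- ===== Notes on version B (the rewrite author's own statement) =====
-- stated objective: faster
-- what changed: A rescans the whole priority-sorted item list from the start for every health; B sorts items once by their hp threshold and does a single ascending sweep over the sorted healths, feeding newly-eligible items into a small list kept sorted by the priority key (-d, hp, index) and popping its head, so ineligible items are never rescanned.
-- outside the precondition, e.g. on items_to_use([250], [[5]]): A raises IndexError, B raises IndexError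
import Mathlib
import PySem

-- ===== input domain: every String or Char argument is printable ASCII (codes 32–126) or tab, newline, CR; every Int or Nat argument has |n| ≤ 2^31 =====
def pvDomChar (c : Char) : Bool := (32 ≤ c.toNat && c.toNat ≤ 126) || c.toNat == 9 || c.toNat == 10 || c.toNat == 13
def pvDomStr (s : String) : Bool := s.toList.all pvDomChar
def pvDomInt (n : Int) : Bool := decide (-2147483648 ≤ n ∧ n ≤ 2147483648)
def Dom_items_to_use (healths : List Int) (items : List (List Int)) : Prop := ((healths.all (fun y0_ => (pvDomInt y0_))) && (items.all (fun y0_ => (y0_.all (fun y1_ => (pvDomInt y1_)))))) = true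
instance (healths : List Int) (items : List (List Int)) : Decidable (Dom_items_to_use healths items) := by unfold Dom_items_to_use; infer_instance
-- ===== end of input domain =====

-- B changes the algorithm (one ascending sweep with an incrementally maintained sorted
-- eligible list instead of a per-health rescan); both A and B sort `healths` in place —
-- the equivalence proved here is about the return value.

-- ===== PORT A =====
-- A's dict {'d':…, 'hp':…, 'n':…} is carried as the triple (d, hp, n).
-- inner `for i in range(len(item_dict)): if …: append n; pop(i); break` — `pre` is the
-- already-scanned prefix, so `pre ++ rest` is item_dict with element i popped.
def scanA (h : Int) : List (Int × Int × Int) → List (Int × Int × Int) → Option Int × List (Int × Int × Int)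
  | pre, [] => (none, pre)
  | pre, x :: rest =>
      if h - x.2.1 ≥ 100 then (some x.2.2, pre ++ rest) else scanA h (pre ++ [x]) rest

def stepA (st : List Int × List (Int × Int × Int)) (h : Int) : List Int × List (Int × Int × Int) :=
  match scanA h [] st.2 with
  | (none, l) => (st.1, l)
  | (some n, l) => (st.1 ++ [n], l)

def items_to_use (healths : List Int) (items : List (List Int)) : List Int :=
  let item_dict := (PySem.List.pyRange 0 (items.length : Int) 1).foldl
    (fun acc i => acc ++ [((PySem.List.pyGetD (PySem.List.pyGetD items i []) 0 0,
                            PySem.List.pyGetD (PySem.List.pyGetD items i []) 1 0,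
                            i + 1) : Int × Int × Int)]) []
  let hs := PySem.List.sorted healths (fun x => x) false
  let s1 := PySem.List.sorted item_dict (fun x => x.2.1) false
  let s2 := PySem.List.sorted s1 (fun x => x.1) true
  let fin := (PySem.List.pyRange 0 (hs.length : Int) 1).foldl
    (fun st hi => stepA st (PySem.List.pyGetD hs hi 0)) ([], s2)
  PySem.List.sorted fin.1 (fun x => x) false

-- ===== PORT B =====
-- Python tuple `<` on the key triples (-d, hp, n)
def kLTb (a b : Int × Int × Int) : Bool :=
  decide (a.1 < b.1) || (decide (a.1 = b.1) &&
    (decide (a.2.1 < b.2.1) || (decide (a.2.1 = b.2.1) && decide (a.2.2 < b.2.2))))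

-- `_insert_sorted`: advance past the elements < k, insert k there
def insSorted : List (Int × Int × Int) → (Int × Int × Int) → List (Int × Int × Int)
  | [], k => [k]
  | e :: es, k => if kLTb e k then e :: insSorted es k else k :: e :: es

-- the `while p < m and pool[p][1] <= h - 100` pointer advance (remaining pool as a list)
def sweepStep (h : Int) : List (Int × Int × Int) → List (Int × Int × Int) → List (Int × Int × Int) × List (Int × Int × Int)
  | elig, [] => (elig, [])
  | elig, t :: rest =>
      if t.2.1 ≤ h - 100 then sweepStep h (insSorted elig t) rest else (elig, t :: rest)

def stepB (st : List Int × List (Int × Int × Int) × List (Int × Int × Int)) (h : Int) :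
    List Int × List (Int × Int × Int) × List (Int × Int × Int) :=
  match sweepStep h st.2.1 st.2.2 with
  | (elig, rest) =>
    match elig with
    | [] => (st.1, [], rest)
    | e :: es => (st.1 ++ [e.2.2], es, rest)

def items_to_use_alt (healths : List Int) (items : List (List Int)) : List Int :=
  let hs := PySem.List.sorted healths (fun x => x) false
  let pool := PySem.List.sorted
    ((PySem.List.enumerate items 0).map
      (fun p => ((-(PySem.List.pyGetD p.2 0 0), PySem.List.pyGetD p.2 1 0, p.1 + 1) : Int × Int × Int)))
    (fun t => t.2.1) false
  let fin := hs.foldl stepB ([], [], pool)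
  PySem.List.sorted fin.1 (fun x => x) false

-- ===== PRECONDITION & SPEC =====
-- Pre_ excludes item rows with fewer than 2 entries: Python A raises IndexError on
-- items[i][0] / items[i][1] there (and B raises likewise).
def Pre_items_to_use (healths : List Int) (items : List (List Int)) : Prop :=
  ∀ it ∈ items, 2 ≤ it.length
instance (healths : List Int) (items : List (List Int)) : Decidable (Pre_items_to_use healths items) := by
  unfold Pre_items_to_use; infer_instance

def pvWitness_items_to_use : List Int × List (List Int) := ([250, 120], [[5, 100], [5, 150]])

def Spec_items_to_use (healths : List Int) (items : List (List Int)) (out : List Int) : Prop :=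
  out = items_to_use_alt healths items
instance (healths : List Int) (items : List (List Int)) (out : List Int) : Decidable (Spec_items_to_use healths items out) := by
  unfold Spec_items_to_use; infer_instance

-- ===== CLAIM (what is proved, stated in full; the proofs are below) =====
def Claim_equal_items_to_use : Prop := ∀ (healths : List Int) (items : List (List Int)), Dom_items_to_use healths items → Pre_items_to_use healths items → Spec_items_to_use healths items (items_to_use healths items)

-- ===== LEMMAS AND PROOFS =====

-- key of an A-side record (d, hp, n); B's pool/elig store these keys directly
def keyOf (r : Int × Int × Int) : Int × Int × Int := (-r.1, r.2.1, r.2.2)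

def kp (a b : Int × Int × Int) : Prop := kLTb a b = true

lemma kLTb_iff (a b : Int × Int × Int) :
    kLTb a b = true ↔ (a.1 < b.1 ∨ (a.1 = b.1 ∧ (a.2.1 < b.2.1 ∨ (a.2.1 = b.2.1 ∧ a.2.2 < b.2.2)))) := by
  simp [kLTb]

lemma kp_trans {a b c : Int × Int × Int} (h1 : kp a b) (h2 : kp b c) : kp a c := by
  obtain ⟨a1, a2, a3⟩ := a; obtain ⟨b1, b2, b3⟩ := b; obtain ⟨c1, c2, c3⟩ := c
  simp only [kp, kLTb_iff] at *; omega

lemma kp_irrefl (a : Int × Int × Int) : ¬ kp a a := by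
  obtain ⟨a1, a2, a3⟩ := a; simp only [kp, kLTb_iff] at *; omega

lemma kp_asymm {a b : Int × Int × Int} (h1 : kp a b) (h2 : kp b a) : False := by
  obtain ⟨a1, a2, a3⟩ := a; obtain ⟨b1, b2, b3⟩ := b
  simp only [kp, kLTb_iff] at *; omega

lemma kp_total {a b : Int × Int × Int} (hne : a ≠ b) (h : ¬ kp a b) : kp b a := by
  obtain ⟨a1, a2, a3⟩ := a; obtain ⟨b1, b2, b3⟩ := b
  simp only [kp, kLTb_iff, ne_eq, Prod.mk.injEq, not_and] at *; omega

lemma kp_ne {a b : Int × Int × Int} (h : kp a b) : a ≠ b := by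
  rintro rfl; exact kp_irrefl a h

lemma insSorted_perm (es : List (Int × Int × Int)) (k : Int × Int × Int) :
    (insSorted es k).Perm (k :: es) := by
  induction es with
  | nil => simp [insSorted]
  | cons e es ih =>
    simp only [insSorted]
    split
    · exact ((ih.cons e).trans (List.Perm.swap k e es))
    · rfl

lemma mem_insSorted {es : List (Int × Int × Int)} {k x : Int × Int × Int} :
    x ∈ insSorted es k ↔ x = k ∨ x ∈ es := by
  rw [(insSorted_perm es k).mem_iff]; simp

lemma insSorted_pairwise {es : List (Int × Int × Int)} {k : Int × Int × Int}
    (hes : es.Pairwise kp) (hk : k ∉ es) : (insSorted es k).Pairwise kp := by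
  induction es with
  | nil => simp [insSorted]
  | cons e es ih =>
    rcases List.pairwise_cons.1 hes with ⟨he, hes'⟩
    simp only [insSorted]
    split
    · rename_i hlt
      refine List.pairwise_cons.2 ⟨?_, ih hes' (fun h => hk (List.mem_cons_of_mem _ h))⟩
      intro z hz
      rcases mem_insSorted.1 hz with rfl | hz'
      · exact hlt
      · exact he z hz'
    · rename_i hnlt
      have hke : kp k e := kp_total (fun h => hk (h ▸ List.mem_cons_self)) hnlt
      refine List.pairwise_cons.2 ⟨?_, hes⟩
      intro z hz
      rcases List.mem_cons.1 hz with rfl | hz'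
      · exact hke
      · exact kp_trans hke (he z hz')

-- sweepStep: splits the pool at the threshold and merges the eligible prefix into elig
lemma sweepStep_spec (h : Int) :
    ∀ (rest elig : List (Int × Int × Int)),
      elig.Pairwise kp →
      rest.Pairwise (fun a b => a.2.1 ≤ b.2.1) →
      (elig ++ rest).Nodup →
      ∃ tk, rest = tk ++ (sweepStep h elig rest).2 ∧
        (sweepStep h elig rest).1.Perm (elig ++ tk) ∧
        (sweepStep h elig rest).1.Pairwise kp ∧
        (∀ t ∈ tk, t.2.1 ≤ h - 100) ∧
        (∀ t ∈ (sweepStep h elig rest).2, ¬ t.2.1 ≤ h - 100) := by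
  intro rest
  induction rest with
  | nil =>
    intro elig he _ _
    exact ⟨[], by simp [sweepStep], by simp [sweepStep], by simpa [sweepStep] using he, by simp, by simp [sweepStep]⟩
  | cons t rest ih =>
    intro elig he hr hnd
    rcases List.pairwise_cons.1 hr with ⟨ht, hr'⟩
    by_cases hel : t.2.1 ≤ h - 100
    · have htne : t ∉ elig := by
        intro hmem
        have := List.disjoint_of_nodup_append hnd
        exact this hmem List.mem_cons_self
      have hnd' : (insSorted elig t ++ rest).Nodup := by
        refine ((insSorted_perm elig t).append_right rest).nodup_iff.2 ?_
        have : (elig ++ t :: rest).Perm (t :: (elig ++ rest)) := List.perm_middle.symm.symm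
        exact (List.perm_middle).nodup_iff.1 hnd
      have he' : (insSorted elig t).Pairwise kp := insSorted_pairwise he htne
      rcases ih (insSorted elig t) he' hr' hnd' with ⟨tk, heq, hperm, hpw, htk, hrest⟩
      have hstep : sweepStep h elig (t :: rest) = sweepStep h (insSorted elig t) rest := by
        simp [sweepStep, hel]
      refine ⟨t :: tk, ?_, ?_, ?_, ?_, ?_⟩
      · rw [hstep]; simpa using congrArg (t :: ·) heq
      · rw [hstep]
        exact hperm.trans (((insSorted_perm elig t).append_right tk).trans List.perm_middle.symm)
      · rw [hstep]; exact hpw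
      · intro z hz
        rcases List.mem_cons.1 hz with rfl | hz'
        · exact hel
        · exact htk z hz'
      · rw [hstep]; exact hrest
    · have hstep : sweepStep h elig (t :: rest) = (elig, t :: rest) := by
        simp [sweepStep, hel]
      refine ⟨[], by simp [hstep], by simp [hstep], by simpa [hstep] using he, by simp, ?_⟩
      intro z hz
      rw [hstep] at hz
      rcases List.mem_cons.1 hz with rfl | hz'
      · exact hel
      · have := ht z hz'
        omega

lemma scanA_none (h : Int) :
    ∀ (L pre : List (Int × Int × Int)), (∀ x ∈ L, ¬ (h - x.2.1 ≥ 100)) →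
      scanA h pre L = (none, pre ++ L) := by
  intro L
  induction L with
  | nil => intro pre _; simp [scanA]
  | cons x rest ih =>
    intro pre hL
    have hx := hL x List.mem_cons_self
    simp only [scanA, if_neg hx]
    rw [ih (pre ++ [x]) (fun y hy => hL y (List.mem_cons_of_mem _ hy))]
    simp

lemma scanA_found (h : Int) :
    ∀ (u : List (Int × Int × Int)) (x : Int × Int × Int) (v pre : List (Int × Int × Int)),
      (∀ y ∈ u, ¬ (h - y.2.1 ≥ 100)) → (h - x.2.1 ≥ 100) →
      scanA h pre (u ++ x :: v) = (some x.2.2, pre ++ (u ++ v)) := by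
  intro u
  induction u with
  | nil => intro x v pre _ hx; simp [scanA, if_pos hx]
  | cons y u ih =>
    intro x v pre hu hx
    have hy := hu y List.mem_cons_self
    simp only [List.cons_append, scanA, if_neg hy]
    rw [ih x v (pre ++ [y]) (fun z hz => hu z (List.mem_cons_of_mem _ hz)) hx]
    simp

lemma exists_first {α : Type} (P : α → Prop) [DecidablePred P] :
    ∀ (L : List α), (∃ x ∈ L, P x) → ∃ u x v, L = u ++ x :: v ∧ (∀ y ∈ u, ¬ P y) ∧ P x := by
  intro L
  induction L with
  | nil => rintro ⟨x, hx, _⟩; cases hx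
  | cons a L ih =>
    intro hex
    by_cases ha : P a
    · exact ⟨[], a, L, rfl, by simp, ha⟩
    · rcases hex with ⟨x, hx, hPx⟩
      rcases List.mem_cons.1 hx with rfl | hx'
      · exact absurd hPx ha
      · rcases ih ⟨x, hx', hPx⟩ with ⟨u, x', v, rfl, hu, hPx'⟩
        exact ⟨a :: u, x', v, rfl, by
          intro y hy
          rcases List.mem_cons.1 hy with rfl | hy'
          · exact ha
          · exact hu y hy', hPx'⟩

-- stability of PySem's insertion sort
def SRel {α : Type} (k : α → Int) (R : α → α → Prop) (a b : α) : Prop :=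
  k a < k b ∨ (k a = k b ∧ R a b)

lemma insertBy_stable {α : Type} (k : α → Int) (R : α → α → Prop)
    (bf : α → α → Bool) (hbf : ∀ a b, bf a b = decide (k a < k b)) (x : α) :
    ∀ (ys : List α), ys.Pairwise (SRel k R) → (∀ y ∈ ys, R y x) →
      (PySem.List.insertBy bf x ys).Pairwise (SRel k R) := by
  intro ys
  induction ys with
  | nil => intro _ _; simp [PySem.List.insertBy]
  | cons y ys ih =>
    intro hys hr
    rcases List.pairwise_cons.1 hys with ⟨hy, hys'⟩
    simp only [PySem.List.insertBy]
    split
    · rename_i hlt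
      rw [hbf] at hlt
      have hxy : k x < k y := by simpa using hlt
      refine List.pairwise_cons.2 ⟨?_, hys⟩
      intro z hz
      rcases List.mem_cons.1 hz with rfl | hz'
      · exact Or.inl hxy
      · rcases hy z hz' with h1 | ⟨h1, _⟩ <;> exact Or.inl (by omega)
    · rename_i hnlt
      rw [hbf] at hnlt
      have hxy : ¬ k x < k y := by simpa using hnlt
      refine List.pairwise_cons.2 ⟨?_, ih hys' (fun z hz => hr z (List.mem_cons_of_mem _ hz))⟩
      intro z hz
      rcases (PySem.List.mem_insertBy _ _ _ _).1 hz with rfl | hz'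
      · by_cases hyx : k y < k z
        · exact Or.inl hyx
        · exact Or.inr ⟨by omega, hr y List.mem_cons_self⟩
      · exact hy z hz'

lemma foldl_insertBy_stable {α : Type} (k : α → Int) (R : α → α → Prop)
    (bf : α → α → Bool) (hbf : ∀ a b, bf a b = decide (k a < k b)) :
    ∀ (xs acc : List α), xs.Pairwise R → acc.Pairwise (SRel k R) →
      (∀ y ∈ acc, ∀ x ∈ xs, R y x) →
      (xs.foldl (fun acc x => PySem.List.insertBy bf x acc) acc).Pairwise (SRel k R) := by
  intro xs
  induction xs with
  | nil => intro acc _ hacc _; simpa using hacc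
  | cons x xs ih =>
    intro acc hxs hacc hrel
    rcases List.pairwise_cons.1 hxs with ⟨hx, hxs'⟩
    simp only [List.foldl_cons]
    refine ih _ hxs' (insertBy_stable k R bf hbf x acc hacc (fun y hy => hrel y hy x List.mem_cons_self)) ?_
    intro y hy z hz
    rcases (PySem.List.mem_insertBy _ _ _ _).1 hy with rfl | hy'
    · exact hx z hz
    · exact hrel y hy' z (List.mem_cons_of_mem _ hz)

-- the simulation: A's rescan loop and B's sweep produce the same ret
lemma sim :
    ∀ (hs : List Int), hs.Pairwise (· ≤ ·) →
    ∀ (L : List (Int × Int × Int)) (elig rest : List (Int × Int × Int)) (ret : List Int),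
      (L.map keyOf).Pairwise kp →
      elig.Pairwise kp →
      rest.Pairwise (fun a b => a.2.1 ≤ b.2.1) →
      (elig ++ rest).Perm (L.map keyOf) →
      (∀ e ∈ elig, ∀ h ∈ hs, e.2.1 ≤ h - 100) →
      (hs.foldl stepA (ret, L)).1 = (hs.foldl stepB (ret, elig, rest)).1 := by
  intro hs
  induction hs with
  | nil => intro _ L elig rest ret _ _ _ _ _; simp
  | cons h hs ih =>
    intro hpwhs L elig rest ret hL he hr hperm hlow
    rcases List.pairwise_cons.1 hpwhs with ⟨hhd, hpw'⟩
    have hndL : (L.map keyOf).Nodup := hL.imp (fun hab => kp_ne hab)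
    have hnd : (elig ++ rest).Nodup := hperm.nodup_iff.2 hndL
    obtain ⟨tk, heq, hpermE, hpwE, htk, hrest'⟩ := sweepStep_spec h rest elig he hr hnd
    have hsw : sweepStep h elig rest = ((sweepStep h elig rest).1, (sweepStep h elig rest).2) := rfl
    have hpermAll : ((sweepStep h elig rest).1 ++ (sweepStep h elig rest).2).Perm (L.map keyOf) :=
      ((hpermE.append_right _).trans (by rw [List.append_assoc, ← heq])).trans hperm
    have hEelig : ∀ e ∈ (sweepStep h elig rest).1, e.2.1 ≤ h - 100 := by
      intro e hme
      rcases List.mem_append.1 (hpermE.subset hme) with h1 | h2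
      · exact hlow e h1 h List.mem_cons_self
      · exact htk e h2
    have hrsub : (sweepStep h elig rest).2.Pairwise (fun a b => a.2.1 ≤ b.2.1) :=
      hr.sublist (by
        conv_rhs => rw [heq]
        exact List.sublist_append_right _ _)
    simp only [List.foldl_cons]
    rcases hEE : (sweepStep h elig rest).1 with _ | ⟨e, es⟩
    · -- nothing eligible: A appends nothing, pops nothing
      have hnone : ∀ x ∈ L, ¬ (h - x.2.1 ≥ 100) := by
        intro x hx hcon
        have hmem : keyOf x ∈ (sweepStep h elig rest).1 ++ (sweepStep h elig rest).2 :=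
          hpermAll.mem_iff.2 (List.mem_map_of_mem hx)
        rw [hEE, List.nil_append] at hmem
        have := hrest' _ hmem
        simp only [keyOf] at this
        omega
      have hstepA : stepA (ret, L) h = (ret, L) := by
        simp [stepA, scanA_none h L [] hnone]
      have hstepB : stepB (ret, elig, rest) h = (ret, [], (sweepStep h elig rest).2) := by
        simp only [stepB]
        rw [hsw, hEE]
      rw [hstepA, hstepB]
      refine ih hpw' L [] _ ret hL (by simp) hrsub ?_ (by simp)
      have hpA := hpermAll
      rw [hEE] at hpA
      simpa using hpA
    · -- head of the eligible buffer = first eligible element of L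
      have hme : e ∈ (sweepStep h elig rest).1 := by rw [hEE]; exact List.mem_cons_self
      have hEe : e.2.1 ≤ h - 100 := hEelig e hme
      have hmemmap : e ∈ L.map keyOf :=
        hpermAll.subset (List.mem_append.2 (Or.inl hme))
      obtain ⟨xe, hxe_mem, hxe_key⟩ := List.mem_map.1 hmemmap
      have hxe_elig : 100 ≤ h - xe.2.1 := by
        have : xe.2.1 = e.2.1 := congrArg (fun z => z.2.1) hxe_key
        omega
      obtain ⟨u, x0, v, hLeq, hu, hx0⟩ :=
        exists_first (fun x => 100 ≤ h - x.2.1) L ⟨xe, hxe_mem, hxe_elig⟩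
      subst hLeq
      have hmemE : keyOf x0 ∈ (sweepStep h elig rest).1 := by
        have hx0L : x0 ∈ u ++ x0 :: v := List.mem_append.2 (Or.inr List.mem_cons_self)
        have hmem2 : keyOf x0 ∈ (sweepStep h elig rest).1 ++ (sweepStep h elig rest).2 :=
          hpermAll.mem_iff.2 (List.mem_map_of_mem hx0L)
        rcases List.mem_append.1 hmem2 with h1 | h2
        · exact h1
        · exfalso
          have := hrest' _ h2
          simp only [keyOf] at this
          omega
      have hkey0 : keyOf x0 = e := by
        rcases List.mem_cons.1 (hEE ▸ hmemE) with h1 | h2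
        · exact h1
        · exfalso
          have hpe : kp e (keyOf x0) := (List.pairwise_cons.1 (hEE ▸ hpwE)).1 _ h2
          have hxe_ne : xe ≠ x0 := by
            rintro rfl
            rw [hxe_key] at hpe
            exact kp_irrefl e hpe
          have hxe_v : xe ∈ v := by
            rcases List.mem_append.1 hxe_mem with h3 | h4
            · exact absurd hxe_elig (hu xe h3)
            · rcases List.mem_cons.1 h4 with h5 | h6
              · exact absurd h5 hxe_ne
              · exact h6
          have hL' : ((u.map keyOf) ++ (keyOf x0 :: v.map keyOf)).Pairwise kp := by
            simpa using hL
          have hmid : kp (keyOf x0) (keyOf xe) :=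
            (List.pairwise_cons.1 (List.pairwise_append.1 hL').2.1).1 _
              (List.mem_map_of_mem hxe_v)
          rw [hxe_key] at hmid
          exact kp_asymm hpe hmid
      have hstepA : stepA (ret, u ++ x0 :: v) h = (ret ++ [x0.2.2], u ++ v) := by
        have hsA := scanA_found h u x0 v [] (fun y hy => hu y hy) hx0
        simp [stepA, hsA]
      have hstepB : stepB (ret, elig, rest) h = (ret ++ [e.2.2], es, (sweepStep h elig rest).2) := by
        simp only [stepB]
        rw [hsw, hEE]
      have hval : e.2.2 = x0.2.2 := by rw [← hkey0]; rfl
      rw [hstepA, hstepB, ← hval]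
      have hLsub : ((u ++ v).map keyOf).Pairwise kp :=
        hL.sublist (((List.sublist_cons_self x0 v).append_left u).map keyOf)
      have hes : es.Pairwise kp := (List.pairwise_cons.1 (hEE ▸ hpwE)).2
      have hperm' : (es ++ (sweepStep h elig rest).2).Perm ((u ++ v).map keyOf) := by
        have h1 : (e :: (es ++ (sweepStep h elig rest).2)).Perm
            (e :: ((u.map keyOf) ++ (v.map keyOf))) := by
          have h2 : ((e :: es) ++ (sweepStep h elig rest).2).Perm
              ((u.map keyOf) ++ (e :: v.map keyOf)) := by
            have h3 := hEE ▸ hpermAll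
            simpa [hkey0] using h3
          exact h2.trans List.perm_middle
        simpa using h1.cons_inv
      refine ih hpw' (u ++ v) es _ (ret ++ [e.2.2]) hLsub hes hrsub hperm' ?_
      intro e' he' h' hh'
      have h1 : e'.2.1 ≤ h - 100 :=
        hEelig e' (by rw [hEE]; exact List.mem_cons_of_mem _ he')
      have h2 : h ≤ h' := hhd h' hh'
      omega

lemma enumerate_eq_zip (xs : List (List Int)) :
    ∀ s : Int, PySem.List.enumerate xs s = (PySem.List.pyRange s (s + xs.length) 1).zip xs := by
  induction xs with
  | nil =>
    intro s
    rw [PySem.List.enumerate_nil, PySem.List.pyRange_one_eq_nil (by simp)]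
    simp
  | cons x xs ih =>
    intro s
    rw [PySem.List.enumerate_cons]
    rw [PySem.List.pyRange_one_cons (by push_cast [List.length_cons]; omega), List.zip_cons_cons,
      ih (s + 1)]
    have harith : s + ((x :: xs).length : Int) = (s + 1) + (xs.length : Int) := by
      push_cast [List.length_cons]; omega
    rw [harith]

lemma map_enum (G : Int → List Int → Int × Int × Int) (xs : List (List Int)) :
    (PySem.List.enumerate xs 0).map (fun p => G p.1 p.2)
      = (PySem.List.pyRange 0 (xs.length : Int) 1).map (fun i => G i (PySem.List.pyGetD xs i [])) := by
  rw [enumerate_eq_zip xs 0]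
  simp only [zero_add]
  apply List.ext_getElem
  · simp [PySem.List.length_pyRange_one]
  · intro k h1 h2
    have hk : k < xs.length := by
      simpa [PySem.List.length_pyRange_one] using h1
    simp only [List.getElem_map, List.getElem_zip, PySem.List.getElem_pyRange_one]
    rw [zero_add, PySem.List.pyGetD_natCast, List.getD_eq_getElem _ _ hk]

-- ===== VERDICT (by name: the statement is the Claim_ definition above) =====
theorem items_to_use_spec : Claim_equal_items_to_use := by
  intro healths items _ _
  unfold Spec_items_to_use
  simp only [items_to_use, items_to_use_alt]
  rw [PySem.List.foldl_append_singleton_eq_map, List.nil_append]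
  rw [PySem.List.foldl_pyRange_zero_pyGetD']
  set f : Int → Int × Int × Int := fun i =>
    (PySem.List.pyGetD (PySem.List.pyGetD items i []) 0 0,
     PySem.List.pyGetD (PySem.List.pyGetD items i []) 1 0, i + 1) with hf
  set ID := (PySem.List.pyRange 0 (items.length : Int) 1).map f with hID
  set s1v := PySem.List.sorted ID (fun x => x.2.1) false with hs1v
  set s2v := PySem.List.sorted s1v (fun x => x.1) true with hs2v
  set P0 := (PySem.List.enumerate items 0).map
    (fun p => ((-(PySem.List.pyGetD p.2 0 0), PySem.List.pyGetD p.2 1 0, p.1 + 1) : Int × Int × Int)) with hP0def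
  set poolv := PySem.List.sorted P0 (fun t => t.2.1) false with hpoolv
  set hsv := PySem.List.sorted healths (fun x => x) false with hhsv
  -- A's double sort is strictly sorted under the lexicographic key
  have hR0 : ID.Pairwise (fun a b => a.2.2 < b.2.2) := by
    rw [hID]
    refine List.pairwise_map.2 ?_
    refine (PySem.List.pairwise_lt_pyRange_one 0 _).imp ?_
    intro i j hij
    simp only [hf]
    omega
  have hS1 : s1v.Pairwise (SRel (fun x => x.2.1) (fun a b => a.2.2 < b.2.2)) := by
    rw [hs1v, PySem.List.sorted_eq_foldl_insertBy]
    exact foldl_insertBy_stable _ _ _ (fun a b => rfl) _ [] hR0 (by simp) (by simp)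
  have hS2 : s2v.Pairwise (SRel (fun x : Int × Int × Int => -x.1)
      (SRel (fun x : Int × Int × Int => x.2.1) (fun a b => a.2.2 < b.2.2))) := by
    rw [hs2v, PySem.List.sorted_rev_eq_foldl_insertBy]
    refine foldl_insertBy_stable _ _ _ (fun a b => decide_eq_decide.2 ?_) _ [] hS1 (by simp) (by simp)
    show b.1 < a.1 ↔ -a.1 < -b.1
    omega
  have hL : (s2v.map keyOf).Pairwise kp := by
    refine List.pairwise_map.2 (hS2.imp ?_)
    intro a b h
    obtain ⟨a1, a2, a3⟩ := a; obtain ⟨b1, b2, b3⟩ := b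
    simp only [SRel, keyOf, kp, kLTb_iff] at *
    omega
  have hrpool : poolv.Pairwise (fun a b => a.2.1 ≤ b.2.1) := by
    rw [hpoolv]
    simpa using PySem.List.sorted_pairwise P0 (fun t => t.2.1)
  have hP0 : P0 = ID.map keyOf := by
    rw [hP0def, hID, List.map_map]
    exact map_enum (fun i it =>
      (-(PySem.List.pyGetD it 0 0), PySem.List.pyGetD it 1 0, i + 1)) items
  have hperm : ([] ++ poolv).Perm (s2v.map keyOf) := by
    rw [List.nil_append, hpoolv, hP0]
    refine (PySem.List.sorted_perm _ _ _).trans ?_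
    exact (((PySem.List.sorted_perm s1v (fun x => x.1) true).trans
      (PySem.List.sorted_perm ID (fun x => x.2.1) false)).map keyOf).symm
  have hpwhs : hsv.Pairwise (· ≤ ·) := by
    rw [hhsv]
    simpa using PySem.List.sorted_pairwise healths (fun x => x)
  refine congrArg (fun l => PySem.List.sorted l (fun x => x) false) ?_
  exact sim hsv hpwhs s2v [] poolv [] hL (by simp) hrpool hperm (by simp)
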